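-- pv_equiv track=rewrite | github.com/zhangtingyu11/python_contest_template | src/basic/array_of_difference.py | calculate_changed_nums_dim2
-- ===== SOURCE A (Python) =====
-- from typing import List
--
-- def calculate_diff_dim2(grid: List[List[int]])->List[List[int]]:
--     """计算二维差分数组
--         diff[i][j] = grid[i][j] - grid[i-1][j] - grid[i][j-1] + grid[i-1][j-1]
--
--     Args:
--         grid (List[List[int]]): 输入的m*n数据
--
--     Returns:
--         List[List[int]]: 生成的m*n的二维差分数组
--     """
--     m, n = len(grid), len(grid[0])
--     diff = [[0] * n for _ in range(m)]
--     for i in range(m):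
--         for j in range(n):
--             if(i==0 and j==0):
--                 diff[i][j] = grid[i][j]
--             elif(i>0 and j==0):
--                 diff[i][j] = grid[i][j]-grid[i-1][j]
--             elif(i==0 and j>0):
--                 diff[i][j] = grid[i][j]-grid[i][j-1]
--             else:
--                 diff[i][j] = grid[i][j] - grid[i-1][j] - grid[i][j-1] + grid[i-1][j-1]
--     return diff
--
-- def calculate_changed_nums_dim2(grid: List[List[int]], changes:List[List[int]])->List[List[int]]:
--     """给定原始grid, 和对应的区间变化changes, 求变化后的矩阵
--     二维前缀和为pre_sum[i][j] = pre_sum[i-1][j]+pre_sum[i][j-1]-pre_sum[i-1][j-1]+diff[i][j]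
--
--     Args:
--         grid (List[List[int]]): 原始的m*n的grid
--         changes (List[List[int]]): 长度为m, 即变化m次, 每个变化为[r1, c1, r2, c2, k], 即左上角为[r1, c1], 右下角为[r2, c2]的矩形范围内的数都增加k
--
--     Returns:
--         List[List[int]]: 变化后的m*n的grid
--     """
--     m, n = len(grid), len(grid[0])
--     diff = calculate_diff_dim2(grid)
--     for row in diff:
--         row.append(0)
--     diff.append([0] * (n+1))
--     for r1, c1, r2, c2, k in changes:
--         diff[r1][c1]+=k
--         diff[r2+1][c1]-=k
--         diff[r1][c2+1]-=k
--         diff[r2+1][c2+1]+=k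
--
--     ans = [[0] * n for _ in range(m)]
--     for i in range(m):
--         for j in range(n):
--             if(i == 0 and j == 0):
--                 ans[i][j] = diff[i][j]
--             elif(i>0 and j==0):
--                 ans[i][j] = ans[i-1][j]+diff[i][j]
--             elif(j>0 and i==0):
--                 ans[i][j] = ans[i][j-1]+diff[i][j]
--             else:
--                 ans[i][j] = ans[i-1][j]+ans[i][j-1]-ans[i-1][j-1]+diff[i][j]
--     return ans
-- ===== SOURCE B (Python) =====
-- from typing import List
--
-- def calculate_changed_nums_dim2(grid: List[List[int]], changes: List[List[int]]) -> List[List[int]]: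
--     """Mark the four signed corners of each change in a zero (m+1)*(n+1) delta matrix,
--     rebuild its 2D prefix with two 1D running-sum passes, and add it to grid cell-wise
--     (no 2D differencing of the input and no 4-branch prefix recurrence)."""
--     m, n = len(grid), len(grid[0])
--     delta = [[0] * (n + 1) for _ in range(m + 1)]
--     for r1, c1, r2, c2, k in changes:
--         delta[r1][c1] += k
--         delta[r2 + 1][c1] -= k
--         delta[r1][c2 + 1] -= k
--         delta[r2 + 1][c2 + 1] += k
--     add = [[0] * n for _ in range(m)]
--     for i in range(m):
--         s = 0
--         for j in range(n):
--             s += delta[i][j]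
--             add[i][j] = s + (add[i - 1][j] if i > 0 else 0)
--     return [[grid[i][j] + add[i][j] for j in range(n)] for i in range(m)]
-- ===== Notes on version B (the rewrite author's own statement) =====
-- stated objective: simpler
-- what changed: Drops A's round trip through a 2D difference of the input (diff(grid) construction and the 4-branch 2D prefix recurrence): B marks the change corners in a zero delta matrix, rebuilds its 2D prefix with two 1D running-sum passes and adds it to the grid cell-wise.
import Mathlib
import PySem

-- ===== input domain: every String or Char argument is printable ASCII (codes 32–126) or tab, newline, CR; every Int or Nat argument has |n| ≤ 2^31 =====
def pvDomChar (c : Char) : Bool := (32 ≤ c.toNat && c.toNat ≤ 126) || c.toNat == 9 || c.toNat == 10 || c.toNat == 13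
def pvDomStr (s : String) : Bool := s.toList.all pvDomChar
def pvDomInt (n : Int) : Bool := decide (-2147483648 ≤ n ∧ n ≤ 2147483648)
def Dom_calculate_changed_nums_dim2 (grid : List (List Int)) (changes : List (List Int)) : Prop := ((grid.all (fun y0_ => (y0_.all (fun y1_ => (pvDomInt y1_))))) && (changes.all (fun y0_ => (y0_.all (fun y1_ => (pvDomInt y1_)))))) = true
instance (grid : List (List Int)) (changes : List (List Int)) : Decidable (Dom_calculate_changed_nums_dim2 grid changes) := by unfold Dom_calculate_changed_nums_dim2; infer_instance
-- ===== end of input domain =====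

-- B drops A's round trip through a 2D difference of the input (diff(grid), corner marking, 4-branch
-- 2D prefix recurrence): it marks the corners in a zero delta matrix, rebuilds its 2D prefix with two
-- 1D running-sum passes and adds it to the grid cell-wise.  Objective: simpler.  Neither program
-- mutates its arguments (A copies into diff/ans; B builds new matrices).

-- ===== PORT A =====
-- grid[i][j] read with getD defaults: in-range under Pre_, where this is exact
def pvGet2 (g : List (List Int)) (i j : Nat) : Int := (g.getD i []).getD j 0
-- d[i][j] = v  (in-place write at Nat indices; in range under Pre_)
def pvSet2 (g : List (List Int)) (i j : Nat) (v : Int) : List (List Int) :=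
  g.modify i (fun row => row.set j v)
-- Python index normalization (negative = from the end); exact under PySem.Raise.InRange len i
def pvIdx (len : Nat) (i : Int) : Nat := (if i < 0 then i + (len:Int) else i).toNat
-- d[i][j] += k with Python (possibly negative) indices i, j; exact under Raise.InRange (kept by Pre_)
def pvAddAt (d : List (List Int)) (i j : Int) (k : Int) : List (List Int) :=
  d.modify (pvIdx d.length i) (fun row => row.modify (pvIdx row.length j) (· + k))

def calculate_diff_dim2 (grid : List (List Int)) : List (List Int) :=
  let m := grid.length
  let n := (grid.getD 0 []).length
  (List.range m).foldl (fun diff i =>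
    (List.range n).foldl (fun diff j =>
      let v : Int :=
        if i = 0 ∧ j = 0 then pvGet2 grid i j
        else if i > 0 ∧ j = 0 then pvGet2 grid i j - pvGet2 grid (i-1) j
        else if i = 0 ∧ j > 0 then pvGet2 grid i j - pvGet2 grid i (j-1)
        else pvGet2 grid i j - pvGet2 grid (i-1) j - pvGet2 grid i (j-1) + pvGet2 grid (i-1) (j-1)
      pvSet2 diff i j v) diff)
    (List.replicate m (List.replicate n 0))

-- one iteration of the `for r1, c1, r2, c2, k in changes` corner-marking loop (the four `+=`
-- statements are textually identical in A and B, so both ports share this transliteration;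
-- Python raises on a non-5-tuple, which Pre_ excludes)
def pvApplyChange (d : List (List Int)) (c : List Int) : List (List Int) :=
  match c with
  | [r1, c1, r2, c2, k] =>
      pvAddAt (pvAddAt (pvAddAt (pvAddAt d r1 c1 k) (r2+1) c1 (-k)) r1 (c2+1) (-k)) (r2+1) (c2+1) k
  | _ => d

def calculate_changed_nums_dim2 (grid : List (List Int)) (changes : List (List Int)) : List (List Int) :=
  let m := grid.length
  let n := (grid.getD 0 []).length
  let diff0 := calculate_diff_dim2 grid
  let diff1 := diff0.map (fun row => row ++ [0]) ++ [List.replicate (n+1) 0]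
  let diff := changes.foldl pvApplyChange diff1
  (List.range m).foldl (fun ans i =>
    (List.range n).foldl (fun ans j =>
      let v : Int :=
        if i = 0 ∧ j = 0 then pvGet2 diff i j
        else if i > 0 ∧ j = 0 then pvGet2 ans (i-1) j + pvGet2 diff i j
        else if j > 0 ∧ i = 0 then pvGet2 ans i (j-1) + pvGet2 diff i j
        else pvGet2 ans (i-1) j + pvGet2 ans i (j-1) - pvGet2 ans (i-1) (j-1) + pvGet2 diff i j
      pvSet2 ans i j v) ans)
    (List.replicate m (List.replicate n 0))

-- ===== PORT B =====
def calculate_changed_nums_dim2_alt (grid : List (List Int)) (changes : List (List Int)) : List (List Int) :=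
  let m := grid.length
  let n := (grid.getD 0 []).length
  let delta := changes.foldl pvApplyChange (List.replicate (m+1) (List.replicate (n+1) 0))
  let add := (List.range m).foldl (fun add i =>
      ((List.range n).foldl (fun (p : List (List Int) × Int) j =>
        let s := p.2 + pvGet2 delta i j
        (pvSet2 p.1 i j (s + (if 0 < i then pvGet2 p.1 (i-1) j else 0)), s))
        (add, 0)).1)
    (List.replicate m (List.replicate n 0))
  (List.range m).map (fun i => (List.range n).map (fun j => pvGet2 grid i j + pvGet2 add i j))

-- ===== PRECONDITION & SPEC =====
-- Pre_ is exactly the domain on which the Python A returns: a nonempty grid whose rows all reach the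
-- first row's width n (both programs read exactly the first n columns of each row), and changes of
-- the form [r1, c1, r2, c2, k] whose four corner marks are valid Python indices of the
-- (m+1) x (n+1) marker matrix (negative values index from the end, as in Python).  Outside it A
-- raises (IndexError on the empty grid / short rows / out-of-range corners, ValueError on a change
-- that is not a 5-list).
def Pre_calculate_changed_nums_dim2 (grid : List (List Int)) (changes : List (List Int)) : Prop :=
  grid ≠ [] ∧
  (∀ row ∈ grid, (grid.getD 0 []).length ≤ row.length) ∧
  (∀ c ∈ changes, c.length = 5 ∧
    PySem.Raise.InRange (grid.length + 1) (c.getD 0 0) ∧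
    PySem.Raise.InRange (grid.length + 1) (c.getD 2 0 + 1) ∧
    PySem.Raise.InRange ((grid.getD 0 []).length + 1) (c.getD 1 0) ∧
    PySem.Raise.InRange ((grid.getD 0 []).length + 1) (c.getD 3 0 + 1))
instance (grid : List (List Int)) (changes : List (List Int)) : Decidable (Pre_calculate_changed_nums_dim2 grid changes) := by
  unfold Pre_calculate_changed_nums_dim2; infer_instance

def pvWitness_calculate_changed_nums_dim2 : List (List Int) × List (List Int) :=
  ([[1, 2], [3, 4]], [[0, 0, 1, 1, 3], [0, 1, 0, 1, 2]])

def Spec_calculate_changed_nums_dim2 (grid : List (List Int)) (changes : List (List Int)) (out : List (List Int)) : Prop := out = calculate_changed_nums_dim2_alt grid changes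
instance (grid : List (List Int)) (changes : List (List Int)) (out : List (List Int)) : Decidable (Spec_calculate_changed_nums_dim2 grid changes out) := by unfold Spec_calculate_changed_nums_dim2; infer_instance

-- ===== CLAIM (what is proved, stated in full; the proofs are below) =====
def Claim_equal_calculate_changed_nums_dim2 : Prop := ∀ (grid : List (List Int)) (changes : List (List Int)), Dom_calculate_changed_nums_dim2 grid changes → Pre_calculate_changed_nums_dim2 grid changes → Spec_calculate_changed_nums_dim2 grid changes (calculate_changed_nums_dim2 grid changes)

-- ===== LEMMAS AND PROOFS =====

-- rectangular shape
def pvRect (d : List (List Int)) (R C : Nat) : Prop :=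
  d.length = R ∧ ∀ a (h : a < d.length), (d[a]'h).length = C

-- the value A's first loop writes at (i, j)
def pvD0 (grid : List (List Int)) (i j : Nat) : Int :=
  pvGet2 grid i j - (if 0 < i then pvGet2 grid (i-1) j else 0)
    - (if 0 < j then pvGet2 grid i (j-1) else 0)
    + (if 0 < i ∧ 0 < j then pvGet2 grid (i-1) (j-1) else 0)

-- 2D prefix sum of the entries of d
def pvRowSum (d : List (List Int)) (i j : Nat) : Int :=
  ∑ b ∈ Finset.range (j+1), pvGet2 d i b
def pvS (d : List (List Int)) (i j : Nat) : Int :=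
  ∑ a ∈ Finset.range (i+1), pvRowSum d a j

-- signed corner contribution of one change at cell (a, b) of the (m+1) x (n+1) marker matrix
def pvEC (m n : Nat) (c : List Int) (a b : Nat) : Int :=
  match c with
  | [r1, c1, r2, c2, k] =>
      (if a = pvIdx (m+1) r1 ∧ b = pvIdx (n+1) c1 then k else 0)
      - (if a = pvIdx (m+1) (r2+1) ∧ b = pvIdx (n+1) c1 then k else 0)
      - (if a = pvIdx (m+1) r1 ∧ b = pvIdx (n+1) (c2+1) then k else 0)
      + (if a = pvIdx (m+1) (r2+1) ∧ b = pvIdx (n+1) (c2+1) then k else 0)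
  | _ => 0

def pvDeltaC (m n : Nat) (changes : List (List Int)) (a b : Nat) : Int :=
  (changes.map (fun c => pvEC m n c a b)).sum

-- d[i][j] += k at already-normalized Nat indices (proof-side reading of pvAddAt)
def pvAdd2 (g : List (List Int)) (i j : Nat) (k : Int) : List (List Int) :=
  g.modify i (fun row => row.modify j (· + k))

-- ---- basic cell lemmas ----
lemma pvGet2_replicate (R C a b : Nat) :
    pvGet2 (List.replicate R (List.replicate C (0:Int))) a b = 0 := by
  by_cases ha : a < R <;> by_cases hb : b < C <;>
    simp [pvGet2, List.getD_eq_getElem?_getD, List.getElem?_replicate, ha, hb]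

lemma pvRect_replicate (R C : Nat) : pvRect (List.replicate R (List.replicate C (0:Int))) R C := by
  refine ⟨List.length_replicate, ?_⟩
  intro a h
  simp

lemma pvRect_set2 {d : List (List Int)} {R C : Nat} (hd : pvRect d R C) (i j : Nat) (v : Int) :
    pvRect (pvSet2 d i j v) R C := by
  obtain ⟨hlen, hrow⟩ := hd
  refine ⟨by simpa [pvSet2] using hlen, ?_⟩
  intro a h
  have ha : a < d.length := by simpa [pvSet2] using h
  unfold pvSet2
  rw [List.getElem_modify]
  by_cases hia : i = a <;> simp [hia, hrow a ha]

lemma pvRect_add2 {d : List (List Int)} {R C : Nat} (hd : pvRect d R C) (i j : Nat) (k : Int) :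
    pvRect (pvAdd2 d i j k) R C := by
  obtain ⟨hlen, hrow⟩ := hd
  refine ⟨by simpa [pvAdd2] using hlen, ?_⟩
  intro a h
  have ha : a < d.length := by simpa [pvAdd2] using h
  unfold pvAdd2
  rw [List.getElem_modify]
  by_cases hia : i = a <;> simp [hia, hrow a ha]

lemma getD_set_int (row : List Int) (j : Nat) (v : Int) (b : Nat) :
    (row.set j v).getD b 0 = if j = b ∧ b < row.length then v else row.getD b 0 := by
  rw [List.getD_eq_getElem?_getD, List.getD_eq_getElem?_getD, List.getElem?_set]
  by_cases hjb : j = b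
  · subst hjb
    by_cases h : j < row.length <;> simp [h]
  · simp [hjb]

lemma getD_modify_int (row : List Int) (j : Nat) (k : Int) (b : Nat) :
    (row.modify j (· + k)).getD b 0 = if j = b ∧ b < row.length then row.getD b 0 + k else row.getD b 0 := by
  rcases lt_or_ge b row.length with h | h
  · rw [List.getD_eq_getElem?_getD,
      List.getElem?_eq_getElem (by simpa using h : b < (row.modify j (· + k)).length),
      List.getElem_modify]
    by_cases hjb : j = b <;>
      simp [hjb, h, List.getD_eq_getElem?_getD, List.getElem?_eq_getElem h]
  · have h1 : (row.modify j (· + k)).getD b 0 = 0 := by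
      rw [List.getD_eq_getElem?_getD, List.getElem?_eq_none (by simpa using h)]
      rfl
    have h2 : row.getD b 0 = 0 := by
      rw [List.getD_eq_getElem?_getD, List.getElem?_eq_none (by simpa using h)]
      rfl
    rw [h1, h2, if_neg (by omega)]

lemma getD_of_lt (d : List (List Int)) (a : Nat) (ha : a < d.length) :
    d.getD a [] = d[a]'ha := by
  rw [List.getD_eq_getElem?_getD, List.getElem?_eq_getElem ha]
  rfl

lemma pvGet2_set2 {d : List (List Int)} {R C : Nat} (hd : pvRect d R C)
    {i j : Nat} (hi : i < R) (hj : j < C) (v : Int) (a b : Nat) :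
    pvGet2 (pvSet2 d i j v) a b = if a = i ∧ b = j then v else pvGet2 d a b := by
  obtain ⟨hlen, hrow⟩ := hd
  subst hlen
  unfold pvGet2
  rcases lt_or_ge a d.length with ha | ha
  · have houter : (pvSet2 d i j v).getD a [] = if i = a then (d[a]'ha).set j v else d[a]'ha := by
      unfold pvSet2
      rw [getD_of_lt _ a (by simpa [pvSet2] using ha), List.getElem_modify]
    by_cases hia : i = a
    · subst hia
      rw [houter, if_pos rfl, getD_set_int, hrow i ha, getD_of_lt d i ha]
      by_cases hbj : b = j
      · subst hbj
        rw [if_pos ⟨rfl, hj⟩, if_pos ⟨rfl, rfl⟩]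
      · rw [if_neg (by tauto), if_neg (by tauto)]
    · rw [houter, if_neg hia, if_neg (by tauto), getD_of_lt d a ha]
  · have h1 : (pvSet2 d i j v).getD a [] = [] := by
      rw [List.getD_eq_getElem?_getD, List.getElem?_eq_none (by simpa [pvSet2] using ha)]
      rfl
    have h2 : d.getD a [] = [] := by
      rw [List.getD_eq_getElem?_getD, List.getElem?_eq_none (by simpa using ha)]
      rfl
    rw [h1, h2, if_neg (by omega)]

lemma pvGet2_add2 {d : List (List Int)} {R C : Nat} (hd : pvRect d R C)
    {i j : Nat} (hi : i < R) (hj : j < C) (k : Int) (a b : Nat) :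
    pvGet2 (pvAdd2 d i j k) a b = pvGet2 d a b + (if a = i ∧ b = j then k else 0) := by
  obtain ⟨hlen, hrow⟩ := hd
  subst hlen
  unfold pvGet2
  rcases lt_or_ge a d.length with ha | ha
  · have houter : (pvAdd2 d i j k).getD a [] = if i = a then (d[a]'ha).modify j (· + k) else d[a]'ha := by
      unfold pvAdd2
      rw [getD_of_lt _ a (by simpa [pvAdd2] using ha), List.getElem_modify]
    by_cases hia : i = a
    · subst hia
      rw [houter, if_pos rfl, getD_modify_int, hrow i ha, getD_of_lt d i ha]
      by_cases hbj : b = j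
      · subst hbj
        rw [if_pos ⟨rfl, hj⟩, if_pos ⟨rfl, rfl⟩]
      · rw [if_neg (by tauto), if_neg (by tauto)]
        ring
    · rw [houter, if_neg hia, if_neg (by tauto), getD_of_lt d a ha]
      ring
  · have h1 : (pvAdd2 d i j k).getD a [] = [] := by
      rw [List.getD_eq_getElem?_getD, List.getElem?_eq_none (by simpa [pvAdd2] using ha)]
      rfl
    have h2 : d.getD a [] = [] := by
      rw [List.getD_eq_getElem?_getD, List.getElem?_eq_none (by simpa using ha)]
      rfl
    rw [h1, h2, if_neg (by omega)]
    ring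

lemma pvIdx_lt {len : Nat} {i : Int} (h : PySem.Raise.InRange len i) : pvIdx len i < len := by
  obtain ⟨h1, h2⟩ := h
  unfold pvIdx
  split_ifs <;> omega

lemma pvAddAt_eq {d : List (List Int)} {R C : Nat} (hd : pvRect d R C) (i j : Int) (k : Int) :
    pvAddAt d i j k = pvAdd2 d (pvIdx R i) (pvIdx C j) k := by
  obtain ⟨hlen, hrow⟩ := hd
  subst hlen
  unfold pvAddAt pvAdd2
  apply List.ext_getElem (by simp)
  intro a h1 h2
  rw [List.getElem_modify, List.getElem_modify]
  by_cases hia : pvIdx d.length i = a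
  · rw [if_pos hia, if_pos hia, hrow a (by simpa using h2)]
  · rw [if_neg hia, if_neg hia]

-- ---- stage 1: the diff matrix is the tabulation of pvD0 ----
lemma diff_inner (grid d : List (List Int)) (m n i : Nat) (f : Nat → Nat → Int)
    (hd : pvRect d m n) (hi : i < m) :
    ∀ N, N ≤ n →
      pvRect ((List.range N).foldl (fun d j => pvSet2 d i j (f i j)) d) m n ∧
      ∀ a b, pvGet2 ((List.range N).foldl (fun d j => pvSet2 d i j (f i j)) d) a b =
        if a = i ∧ b < N then f i b else pvGet2 d a b := by
  intro N
  induction N with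
  | zero => intro _; exact ⟨hd, by intro a b; simp⟩
  | succ N ih =>
    intro hN
    obtain ⟨hrect, hget⟩ := ih (by omega)
    rw [List.range_succ, List.foldl_append]
    refine ⟨pvRect_set2 hrect i N (f i N), ?_⟩
    intro a b
    simp only [List.foldl_cons, List.foldl_nil]
    rw [pvGet2_set2 hrect hi (by omega) (f i N) a b, hget a b]
    by_cases hai : a = i
    · subst hai
      by_cases hbN : b = N
      · subst hbN; simp
      · by_cases hbn : b < N <;> simp [hbN, hbn] <;> omega
    · simp [hai]

lemma diff_outer (grid d : List (List Int)) (m n : Nat) (f : Nat → Nat → Int)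
    (hd : pvRect d m n) :
    ∀ M, M ≤ m →
      pvRect ((List.range M).foldl (fun d i => (List.range n).foldl (fun d j => pvSet2 d i j (f i j)) d) d) m n ∧
      ∀ a b, b < n → pvGet2 ((List.range M).foldl (fun d i => (List.range n).foldl (fun d j => pvSet2 d i j (f i j)) d) d) a b =
        if a < M then f a b else pvGet2 d a b := by
  intro M
  induction M with
  | zero => intro _; exact ⟨hd, by intro a b _; simp⟩
  | succ M ih =>
    intro hM
    obtain ⟨hrect, hget⟩ := ih (by omega)
    rw [List.range_succ, List.foldl_append]
    simp only [List.foldl_cons, List.foldl_nil]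
    obtain ⟨hrect', hget'⟩ := diff_inner grid _ m n M f hrect (by omega) n (le_refl n)
    refine ⟨hrect', ?_⟩
    intro a b hb
    rw [hget' a b, ]
    by_cases haM : a = M
    · subst haM; simp [hb]
    · by_cases haM' : a < M <;> simp [haM, haM', hb, hget a b hb] <;> omega

lemma calculate_diff_spec (grid : List (List Int)) :
    pvRect (calculate_diff_dim2 grid) grid.length (grid.getD 0 []).length ∧
    ∀ a b, b < (grid.getD 0 []).length →
      pvGet2 (calculate_diff_dim2 grid) a b = if a < grid.length then pvD0 grid a b else 0 := by
  have key := diff_outer grid (List.replicate grid.length (List.replicate (grid.getD 0 []).length 0))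
    grid.length (grid.getD 0 []).length
    (fun i j =>
        if i = 0 ∧ j = 0 then pvGet2 grid i j
        else if i > 0 ∧ j = 0 then pvGet2 grid i j - pvGet2 grid (i-1) j
        else if i = 0 ∧ j > 0 then pvGet2 grid i j - pvGet2 grid i (j-1)
        else pvGet2 grid i j - pvGet2 grid (i-1) j - pvGet2 grid i (j-1) + pvGet2 grid (i-1) (j-1))
    (pvRect_replicate _ _) grid.length (le_refl _)
  obtain ⟨hrect, hget⟩ := key
  refine ⟨hrect, ?_⟩
  intro a b hb
  unfold calculate_diff_dim2
  rw [hget a b hb]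
  by_cases ha : a < grid.length
  · simp only [if_pos ha]
    unfold pvD0
    by_cases h1 : a = 0 <;> by_cases h2 : b = 0 <;>
      simp [h1, h2] <;> omega
  · simp [ha, pvGet2_replicate]

lemma ite_negk (P : Prop) [Decidable P] (k : Int) : (if P then -k else 0) = -(if P then k else 0) := by
  split_ifs <;> ring

-- ---- stage 2: applying the changes adds pvEC pointwise ----
lemma applyChange_spec {d : List (List Int)} {m n : Nat} (hd : pvRect d (m+1) (n+1))
    {c : List Int} (hc : c.length = 5 ∧
      PySem.Raise.InRange (m+1) (c.getD 0 0) ∧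
      PySem.Raise.InRange (m+1) (c.getD 2 0 + 1) ∧
      PySem.Raise.InRange (n+1) (c.getD 1 0) ∧
      PySem.Raise.InRange (n+1) (c.getD 3 0 + 1)) :
    pvRect (pvApplyChange d c) (m+1) (n+1) ∧
    ∀ a b, pvGet2 (pvApplyChange d c) a b = pvGet2 d a b + pvEC m n c a b := by
  match c, hc with
  | [r1, c1, r2, c2, k], hc =>
    simp only [List.getD, List.getElem?_cons_zero, List.getElem?_cons_succ, Option.getD_some] at hc
    obtain ⟨-, hr1, hr2, hc1, hc2⟩ := hc
    have hb1 := pvIdx_lt hr1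
    have hb2 := pvIdx_lt hr2
    have hb3 := pvIdx_lt hc1
    have hb4 := pvIdx_lt hc2
    have e1 : pvAddAt d r1 c1 k = pvAdd2 d (pvIdx (m+1) r1) (pvIdx (n+1) c1) k :=
      pvAddAt_eq hd r1 c1 k
    have h1 : pvRect (pvAddAt d r1 c1 k) (m+1) (n+1) := by
      rw [e1]; exact pvRect_add2 hd _ _ _
    have e2 : pvAddAt (pvAddAt d r1 c1 k) (r2+1) c1 (-k) =
        pvAdd2 (pvAddAt d r1 c1 k) (pvIdx (m+1) (r2+1)) (pvIdx (n+1) c1) (-k) :=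
      pvAddAt_eq h1 (r2+1) c1 (-k)
    have h2 : pvRect (pvAddAt (pvAddAt d r1 c1 k) (r2+1) c1 (-k)) (m+1) (n+1) := by
      rw [e2]; exact pvRect_add2 h1 _ _ _
    have e3 : pvAddAt (pvAddAt (pvAddAt d r1 c1 k) (r2+1) c1 (-k)) r1 (c2+1) (-k) =
        pvAdd2 (pvAddAt (pvAddAt d r1 c1 k) (r2+1) c1 (-k)) (pvIdx (m+1) r1) (pvIdx (n+1) (c2+1)) (-k) :=
      pvAddAt_eq h2 r1 (c2+1) (-k)
    have h3 : pvRect (pvAddAt (pvAddAt (pvAddAt d r1 c1 k) (r2+1) c1 (-k)) r1 (c2+1) (-k)) (m+1) (n+1) := by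
      rw [e3]; exact pvRect_add2 h2 _ _ _
    have e4 : pvApplyChange d [r1, c1, r2, c2, k] =
        pvAdd2 (pvAddAt (pvAddAt (pvAddAt d r1 c1 k) (r2+1) c1 (-k)) r1 (c2+1) (-k))
          (pvIdx (m+1) (r2+1)) (pvIdx (n+1) (c2+1)) k :=
      pvAddAt_eq h3 (r2+1) (c2+1) k
    have h4 : pvRect (pvApplyChange d [r1, c1, r2, c2, k]) (m+1) (n+1) := by
      rw [e4]; exact pvRect_add2 h3 _ _ _
    refine ⟨h4, ?_⟩
    intro a b
    rw [e4, pvGet2_add2 h3 hb2 hb4, e3, pvGet2_add2 h2 hb1 hb4, e2,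
      pvGet2_add2 h1 hb2 hb3, e1, pvGet2_add2 hd hb1 hb3]
    have hpv : pvEC m n [r1, c1, r2, c2, k] a b =
        (if a = pvIdx (m+1) r1 ∧ b = pvIdx (n+1) c1 then k else 0)
        - (if a = pvIdx (m+1) (r2+1) ∧ b = pvIdx (n+1) c1 then k else 0)
        - (if a = pvIdx (m+1) r1 ∧ b = pvIdx (n+1) (c2+1) then k else 0)
        + (if a = pvIdx (m+1) (r2+1) ∧ b = pvIdx (n+1) (c2+1) then k else 0) := rfl
    rw [hpv, ite_negk, ite_negk]
    ring

lemma foldl_changes_spec {m n : Nat} :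
    ∀ (changes : List (List Int)) (d : List (List Int)), pvRect d (m+1) (n+1) →
    (∀ c ∈ changes, c.length = 5 ∧
      PySem.Raise.InRange (m+1) (c.getD 0 0) ∧
      PySem.Raise.InRange (m+1) (c.getD 2 0 + 1) ∧
      PySem.Raise.InRange (n+1) (c.getD 1 0) ∧
      PySem.Raise.InRange (n+1) (c.getD 3 0 + 1)) →
    pvRect (changes.foldl pvApplyChange d) (m+1) (n+1) ∧
    ∀ a b, pvGet2 (changes.foldl pvApplyChange d) a b = pvGet2 d a b + pvDeltaC m n changes a b := by
  intro changes
  induction changes with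
  | nil => intro d hd _; exact ⟨hd, by intro a b; simp [pvDeltaC]⟩
  | cons c cs ih =>
    intro d hd hcs
    obtain ⟨h1, h2⟩ := applyChange_spec hd (hcs c (by simp))
    obtain ⟨h3, h4⟩ := ih (pvApplyChange d c) h1 (fun c' hc' => hcs c' (by simp [hc']))
    refine ⟨h3, ?_⟩
    intro a b
    rw [List.foldl_cons, h4 a b, h2 a b]
    simp [pvDeltaC]
    ring

-- ---- prefix-sum recurrences ----
lemma pvS_zero_zero (d : List (List Int)) : pvS d 0 0 = pvGet2 d 0 0 := by
  simp [pvS, pvRowSum]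

lemma pvS_row (d : List (List Int)) (i : Nat) :
    pvS d (i+1) 0 = pvS d i 0 + pvGet2 d (i+1) 0 := by
  simp [pvS, Finset.sum_range_succ, pvRowSum]

lemma pvS_col (d : List (List Int)) (j : Nat) :
    pvS d 0 (j+1) = pvS d 0 j + pvGet2 d 0 (j+1) := by
  simp [pvS, pvRowSum, Finset.sum_range_succ]

lemma pvS_mid (d : List (List Int)) (i j : Nat) :
    pvS d (i+1) (j+1) =
      pvS d i (j+1) + pvS d (i+1) j - pvS d i j + pvGet2 d (i+1) (j+1) := by
  have h1 : pvS d (i+1) (j+1) = pvS d i (j+1) + pvRowSum d (i+1) (j+1) := by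
    simp [pvS, Finset.sum_range_succ]
  have h2 : pvS d (i+1) j = pvS d i j + pvRowSum d (i+1) j := by
    simp [pvS, Finset.sum_range_succ]
  have h3 : pvRowSum d (i+1) (j+1) = pvRowSum d (i+1) j + pvGet2 d (i+1) (j+1) := by
    simp [pvRowSum, Finset.sum_range_succ]
  omega

-- ---- stage 3: the prefix-sum loop tabulates pvS ----
lemma ans_inner (diff d : List (List Int)) (m n i : Nat)
    (hd : pvRect d m n) (hi : i < m)
    (hinv : ∀ a b, a < m → b < n → pvGet2 d a b = if a < i then pvS diff a b else 0) :
    ∀ N, N ≤ n →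
      pvRect ((List.range N).foldl (fun ans j =>
        pvSet2 ans i j (
          if i = 0 ∧ j = 0 then pvGet2 diff i j
          else if i > 0 ∧ j = 0 then pvGet2 ans (i-1) j + pvGet2 diff i j
          else if j > 0 ∧ i = 0 then pvGet2 ans i (j-1) + pvGet2 diff i j
          else pvGet2 ans (i-1) j + pvGet2 ans i (j-1) - pvGet2 ans (i-1) (j-1) + pvGet2 diff i j)) d) m n ∧
      ∀ a b, a < m → b < n →
        pvGet2 ((List.range N).foldl (fun ans j =>
          pvSet2 ans i j (
          if i = 0 ∧ j = 0 then pvGet2 diff i j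
          else if i > 0 ∧ j = 0 then pvGet2 ans (i-1) j + pvGet2 diff i j
          else if j > 0 ∧ i = 0 then pvGet2 ans i (j-1) + pvGet2 diff i j
          else pvGet2 ans (i-1) j + pvGet2 ans i (j-1) - pvGet2 ans (i-1) (j-1) + pvGet2 diff i j)) d) a b =
          if a < i ∨ (a = i ∧ b < N) then pvS diff a b else 0 := by
  intro N
  induction N with
  | zero =>
    intro _
    refine ⟨hd, ?_⟩
    intro a b ha hb
    simp only [List.range_zero, List.foldl_nil]
    rw [hinv a b ha hb]
    by_cases h : a < i
    · rw [if_pos h, if_pos (Or.inl h)]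
    · rw [if_neg h, if_neg (by omega)]
  | succ N ih =>
    intro hN
    obtain ⟨hrect, hget⟩ := ih (by omega)
    rw [List.range_succ, List.foldl_append]
    simp only [List.foldl_cons, List.foldl_nil]
    set st := (List.range N).foldl _ d with hst
    refine ⟨pvRect_set2 hrect i N _, ?_⟩
    have hval : (if i = 0 ∧ N = 0 then pvGet2 diff i N
          else if i > 0 ∧ N = 0 then pvGet2 st (i-1) N + pvGet2 diff i N
          else if N > 0 ∧ i = 0 then pvGet2 st i (N-1) + pvGet2 diff i N
          else pvGet2 st (i-1) N + pvGet2 st i (N-1) - pvGet2 st (i-1) (N-1) + pvGet2 diff i N)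
        = pvS diff i N := by
      by_cases h1 : i = 0 <;> by_cases h2 : N = 0
      · rw [if_pos ⟨h1, h2⟩, h1, h2, pvS_zero_zero]
      · obtain ⟨j', rfl⟩ : ∃ j', N = j' + 1 := ⟨N - 1, by omega⟩
        subst h1
        rw [if_neg (show ¬((0:Nat) = 0 ∧ j' + 1 = 0) by omega),
            if_neg (show ¬((0:Nat) > 0 ∧ j' + 1 = 0) by omega),
            if_pos (show j' + 1 > 0 ∧ (0:Nat) = 0 by omega)]
        simp only [Nat.add_sub_cancel]
        rw [hget 0 j' (by omega) (by omega), if_pos (by omega), pvS_col]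
      · obtain ⟨i', rfl⟩ : ∃ i', i = i' + 1 := ⟨i - 1, by omega⟩
        subst h2
        rw [if_neg (show ¬(i' + 1 = 0 ∧ (0:Nat) = 0) by omega),
            if_pos (show i' + 1 > 0 ∧ (0:Nat) = 0 by omega)]
        simp only [Nat.add_sub_cancel]
        rw [hget i' 0 (by omega) (by omega), if_pos (by omega), pvS_row]
      · obtain ⟨i', rfl⟩ : ∃ i', i = i' + 1 := ⟨i - 1, by omega⟩
        obtain ⟨j', rfl⟩ : ∃ j', N = j' + 1 := ⟨N - 1, by omega⟩
        rw [if_neg (show ¬(i' + 1 = 0 ∧ j' + 1 = 0) by omega),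
            if_neg (show ¬(i' + 1 > 0 ∧ j' + 1 = 0) by omega),
            if_neg (show ¬(j' + 1 > 0 ∧ i' + 1 = 0) by omega)]
        simp only [Nat.add_sub_cancel]
        rw [hget i' (j'+1) (by omega) (by omega), hget (i'+1) j' (by omega) (by omega),
          hget i' j' (by omega) (by omega)]
        rw [if_pos (by omega), if_pos (by omega), if_pos (by omega), pvS_mid]
    intro a b ha hb
    rw [pvGet2_set2 hrect hi (by omega) _ a b]
    by_cases hcell : a = i ∧ b = N
    · rw [if_pos hcell, if_pos (Or.inr ⟨hcell.1, by omega⟩), hcell.1, hcell.2]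
      exact hval
    · rw [if_neg hcell, hget a b ha hb]
      by_cases hlt : a < i ∨ (a = i ∧ b < N)
      · rw [if_pos hlt, if_pos (by omega)]
      · rw [if_neg hlt, if_neg (by omega)]

lemma ans_outer (diff : List (List Int)) (m n : Nat) :
    ∀ M, M ≤ m →
      pvRect ((List.range M).foldl (fun ans i => (List.range n).foldl (fun ans j =>
        pvSet2 ans i j (
          if i = 0 ∧ j = 0 then pvGet2 diff i j
          else if i > 0 ∧ j = 0 then pvGet2 ans (i-1) j + pvGet2 diff i j
          else if j > 0 ∧ i = 0 then pvGet2 ans i (j-1) + pvGet2 diff i j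
          else pvGet2 ans (i-1) j + pvGet2 ans i (j-1) - pvGet2 ans (i-1) (j-1) + pvGet2 diff i j)) ans)
        (List.replicate m (List.replicate n 0))) m n ∧
      ∀ a b, a < m → b < n →
        pvGet2 ((List.range M).foldl (fun ans i => (List.range n).foldl (fun ans j =>
          pvSet2 ans i j (
          if i = 0 ∧ j = 0 then pvGet2 diff i j
          else if i > 0 ∧ j = 0 then pvGet2 ans (i-1) j + pvGet2 diff i j
          else if j > 0 ∧ i = 0 then pvGet2 ans i (j-1) + pvGet2 diff i j
          else pvGet2 ans (i-1) j + pvGet2 ans i (j-1) - pvGet2 ans (i-1) (j-1) + pvGet2 diff i j)) ans)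
          (List.replicate m (List.replicate n 0))) a b =
          if a < M then pvS diff a b else 0 := by
  intro M
  induction M with
  | zero =>
    intro _
    refine ⟨pvRect_replicate _ _, ?_⟩
    intro a b _ _
    simp [pvGet2_replicate]
  | succ M ih =>
    intro hM
    obtain ⟨hrect, hget⟩ := ih (by omega)
    rw [List.range_succ, List.foldl_append]
    simp only [List.foldl_cons, List.foldl_nil]
    obtain ⟨hrect', hget'⟩ := ans_inner diff _ m n M hrect (by omega) hget n (le_refl n)
    refine ⟨hrect', ?_⟩
    intro a b ha hb
    rw [hget' a b ha hb]
    by_cases h : a < M + 1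
    · rw [if_pos h, if_pos (by omega)]
    · rw [if_neg h, if_neg (by omega)]

-- ---- B's running-sum loop tabulates the same 2D prefix ----
lemma pvRowSum_succ (d : List (List Int)) (i j : Nat) :
    pvRowSum d i (j+1) = pvRowSum d i j + pvGet2 d i (j+1) := by
  simp [pvRowSum, Finset.sum_range_succ]

lemma pvS_zero_row (d : List (List Int)) (j : Nat) : pvS d 0 j = pvRowSum d 0 j := by
  simp [pvS]

lemma pvS_succ (d : List (List Int)) (i j : Nat) :
    pvS d (i+1) j = pvS d i j + pvRowSum d (i+1) j := by
  simp [pvS, Finset.sum_range_succ]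

lemma addB_inner (delta d : List (List Int)) (m n i : Nat)
    (hd : pvRect d m n) (hi : i < m)
    (hinv : ∀ a b, a < m → b < n → pvGet2 d a b = if a < i then pvS delta a b else 0) :
    ∀ N, N ≤ n →
      pvRect ((List.range N).foldl (fun (p : List (List Int) × Int) j =>
        (pvSet2 p.1 i j ((p.2 + pvGet2 delta i j) + (if 0 < i then pvGet2 p.1 (i-1) j else 0)),
          p.2 + pvGet2 delta i j)) (d, 0)).1 m n ∧
      ((List.range N).foldl (fun (p : List (List Int) × Int) j =>
        (pvSet2 p.1 i j ((p.2 + pvGet2 delta i j) + (if 0 < i then pvGet2 p.1 (i-1) j else 0)),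
          p.2 + pvGet2 delta i j)) (d, 0)).2 = (if N = 0 then 0 else pvRowSum delta i (N-1)) ∧
      ∀ a b, a < m → b < n →
        pvGet2 ((List.range N).foldl (fun (p : List (List Int) × Int) j =>
          (pvSet2 p.1 i j ((p.2 + pvGet2 delta i j) + (if 0 < i then pvGet2 p.1 (i-1) j else 0)),
            p.2 + pvGet2 delta i j)) (d, 0)).1 a b =
          if a < i ∨ (a = i ∧ b < N) then pvS delta a b else 0 := by
  intro N
  induction N with
  | zero =>
    intro _
    refine ⟨hd, rfl, ?_⟩
    intro a b ha hb
    simp only [List.range_zero, List.foldl_nil]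
    rw [hinv a b ha hb]
    by_cases h : a < i
    · rw [if_pos h, if_pos (Or.inl h)]
    · rw [if_neg h, if_neg (by omega)]
  | succ N ih =>
    intro hN
    obtain ⟨hrect, hs, hget⟩ := ih (by omega)
    rw [List.range_succ, List.foldl_append]
    simp only [List.foldl_cons, List.foldl_nil]
    set p := (List.range N).foldl _ (d, (0:Int)) with hp
    have hsval : p.2 + pvGet2 delta i N = pvRowSum delta i N := by
      rw [hs]
      by_cases hN0 : N = 0
      · subst hN0; simp [pvRowSum]
      · obtain ⟨N', rfl⟩ : ∃ N', N = N' + 1 := ⟨N - 1, by omega⟩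
        rw [if_neg (by omega)]
        simp only [Nat.add_sub_cancel]
        rw [pvRowSum_succ]
    have hval : (p.2 + pvGet2 delta i N) + (if 0 < i then pvGet2 p.1 (i-1) N else 0) =
        pvS delta i N := by
      rw [hsval]
      by_cases hi0 : 0 < i
      · obtain ⟨i', rfl⟩ : ∃ i', i = i' + 1 := ⟨i - 1, by omega⟩
        rw [if_pos hi0]
        simp only [Nat.add_sub_cancel]
        rw [hget i' N (by omega) (by omega), if_pos (by omega), pvS_succ]
        ring
      · have hi0' : i = 0 := by omega
        subst hi0'
        rw [if_neg (by omega), pvS_zero_row]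
        ring
    refine ⟨pvRect_set2 hrect i N _, ?_, ?_⟩
    · rw [if_neg (by omega), Nat.add_sub_cancel]
      exact hsval
    intro a b ha hb
    rw [pvGet2_set2 hrect hi (by omega) _ a b]
    by_cases hcell : a = i ∧ b = N
    · rw [if_pos hcell, if_pos (Or.inr ⟨hcell.1, by omega⟩), hcell.1, hcell.2]
      exact hval
    · rw [if_neg hcell, hget a b ha hb]
      by_cases hlt : a < i ∨ (a = i ∧ b < N)
      · rw [if_pos hlt, if_pos (by omega)]
      · rw [if_neg hlt, if_neg (by omega)]

lemma addB_outer (delta : List (List Int)) (m n : Nat) :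
    ∀ M, M ≤ m →
      pvRect ((List.range M).foldl (fun add i =>
        ((List.range n).foldl (fun (p : List (List Int) × Int) j =>
          (pvSet2 p.1 i j ((p.2 + pvGet2 delta i j) + (if 0 < i then pvGet2 p.1 (i-1) j else 0)),
            p.2 + pvGet2 delta i j)) (add, 0)).1)
        (List.replicate m (List.replicate n 0))) m n ∧
      ∀ a b, a < m → b < n →
        pvGet2 ((List.range M).foldl (fun add i =>
          ((List.range n).foldl (fun (p : List (List Int) × Int) j =>
            (pvSet2 p.1 i j ((p.2 + pvGet2 delta i j) + (if 0 < i then pvGet2 p.1 (i-1) j else 0)),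
              p.2 + pvGet2 delta i j)) (add, 0)).1)
          (List.replicate m (List.replicate n 0))) a b =
          if a < M then pvS delta a b else 0 := by
  intro M
  induction M with
  | zero =>
    intro _
    refine ⟨pvRect_replicate _ _, ?_⟩
    intro a b _ _
    simp [pvGet2_replicate]
  | succ M ih =>
    intro hM
    obtain ⟨hrect, hget⟩ := ih (by omega)
    rw [List.range_succ, List.foldl_append]
    simp only [List.foldl_cons, List.foldl_nil]
    obtain ⟨hrect', -, hget'⟩ := addB_inner delta _ m n M hrect (by omega) hget n (le_refl n)
    refine ⟨hrect', ?_⟩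
    intro a b ha hb
    rw [hget' a b ha hb]
    by_cases h : a < M + 1
    · rw [if_pos h, if_pos (by omega)]
    · rw [if_neg h, if_neg (by omega)]

-- ---- double telescoping: the prefix sum of pvD0 is the grid itself ----
lemma telescope1 (g : Nat → Int) (j : Nat) :
    ∑ b ∈ Finset.range (j+1), (g b - if 0 < b then g (b-1) else 0) = g j := by
  induction j with
  | zero => simp
  | succ j ih =>
    rw [Finset.sum_range_succ, ih, if_pos (by omega)]
    simp

lemma pvS_D0 (grid : List (List Int)) (i j : Nat) :
    (∑ a ∈ Finset.range (i+1), ∑ b ∈ Finset.range (j+1), pvD0 grid a b) = pvGet2 grid i j := by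
  have inner : ∀ a, (∑ b ∈ Finset.range (j+1), pvD0 grid a b) =
      (pvGet2 grid a j - if 0 < a then pvGet2 grid (a-1) j else 0) := by
    intro a
    have split : ∀ b, pvD0 grid a b =
        (pvGet2 grid a b - if 0 < b then pvGet2 grid a (b-1) else 0)
        - (if 0 < a then (pvGet2 grid (a-1) b - if 0 < b then pvGet2 grid (a-1) (b-1) else 0) else 0) := by
      intro b
      unfold pvD0
      by_cases h1 : 0 < a <;> by_cases h2 : 0 < b <;> simp [h1, h2] <;> ring
    rw [Finset.sum_congr rfl (fun b _ => split b), Finset.sum_sub_distrib,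
      telescope1 (fun b => pvGet2 grid a b) j]
    by_cases h1 : 0 < a
    · simp only [if_pos h1]
      rw [telescope1 (fun b => pvGet2 grid (a-1) b) j]
    · simp [h1]
  rw [Finset.sum_congr rfl (fun a _ => inner a)]
  exact telescope1 (fun a => pvGet2 grid a j) i

-- ---- bridging getD and getElem ----
lemma getD_of_lt_int (row : List Int) (b : Nat) (hb : b < row.length) :
    row.getD b 0 = row[b]'hb := by
  rw [List.getD_eq_getElem?_getD, List.getElem?_eq_getElem hb]
  rfl

lemma getElem2_eq_pvGet2 (d : List (List Int)) (a b : Nat) (ha : a < d.length)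
    (hb : b < (d[a]'ha).length) : (d[a]'ha)[b]'hb = pvGet2 d a b := by
  unfold pvGet2
  rw [getD_of_lt d a ha, getD_of_lt_int _ b hb]

-- ---- the padded diff matrix ----
lemma padded_spec (grid : List (List Int)) :
    pvRect ((calculate_diff_dim2 grid).map (fun row => row ++ [0]) ++ [List.replicate ((grid.getD 0 []).length+1) 0])
      (grid.length+1) ((grid.getD 0 []).length+1) ∧
    ∀ a b, a < grid.length → b < (grid.getD 0 []).length →
      pvGet2 ((calculate_diff_dim2 grid).map (fun row => row ++ [0]) ++ [List.replicate ((grid.getD 0 []).length+1) 0]) a b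
        = pvD0 grid a b := by
  obtain ⟨⟨hDlen, hDrow⟩, hDget⟩ := calculate_diff_spec grid
  have hPlen : ((calculate_diff_dim2 grid).map (fun row => row ++ [0]) ++ [List.replicate ((grid.getD 0 []).length+1) 0]).length = grid.length + 1 := by
    rw [List.length_append, List.length_map, hDlen]
    rfl
  constructor
  · refine ⟨hPlen, ?_⟩
    intro a h
    have ha' : a < grid.length + 1 := by rwa [hPlen] at h
    rcases lt_or_ge a grid.length with ha | ha
    · rw [List.getElem_append_left (by rw [List.length_map, hDlen]; exact ha), List.getElem_map]
      rw [List.length_append, hDrow a (by rwa [hDlen])]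
      rfl
    · have haeq : a = grid.length := by omega
      have hmap : a - ((calculate_diff_dim2 grid).map (fun row => row ++ [0])).length = 0 := by
        rw [List.length_map, hDlen]; omega
      rw [List.getElem_append_right (by rw [List.length_map, hDlen]; omega)]
      simp
  · intro a b ha hb
    have ha' : a < ((calculate_diff_dim2 grid).map (fun row => row ++ [0])).length := by
      rw [List.length_map, hDlen]; exact ha
    have haD : a < (calculate_diff_dim2 grid).length := by rwa [hDlen]
    unfold pvGet2
    rw [getD_of_lt _ a (by rw [hPlen]; omega),
      List.getElem_append_left ha', List.getElem_map]
    have hrowb : b < ((calculate_diff_dim2 grid)[a]'haD).length := by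
      rw [hDrow a haD]; exact hb
    rw [List.getD_eq_getElem?_getD, List.getElem?_append_left hrowb,
      List.getElem?_eq_getElem hrowb]
    have := hDget a b hb
    rw [if_pos ha] at this
    rw [← this]
    unfold pvGet2
    rw [getD_of_lt _ a haD, getD_of_lt_int _ b hrowb]
    rfl

-- ---- A's characterisation ----
lemma calcA_spec (grid changes : List (List Int))
    (hcs : ∀ c ∈ changes, c.length = 5 ∧
      PySem.Raise.InRange (grid.length + 1) (c.getD 0 0) ∧
      PySem.Raise.InRange (grid.length + 1) (c.getD 2 0 + 1) ∧
      PySem.Raise.InRange ((grid.getD 0 []).length + 1) (c.getD 1 0) ∧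
      PySem.Raise.InRange ((grid.getD 0 []).length + 1) (c.getD 3 0 + 1)) :
    pvRect (calculate_changed_nums_dim2 grid changes) grid.length (grid.getD 0 []).length ∧
    ∀ a b, a < grid.length → b < (grid.getD 0 []).length →
      pvGet2 (calculate_changed_nums_dim2 grid changes) a b =
        pvGet2 grid a b + (∑ a' ∈ Finset.range (a+1), ∑ b' ∈ Finset.range (b+1),
          pvDeltaC grid.length (grid.getD 0 []).length changes a' b') := by
  obtain ⟨hPrect, hPget⟩ := padded_spec grid
  obtain ⟨hCrect, hCget⟩ := foldl_changes_spec changes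
    ((calculate_diff_dim2 grid).map (fun row => row ++ [0]) ++ [List.replicate ((grid.getD 0 []).length+1) 0])
    hPrect hcs
  obtain ⟨hArect, hAget⟩ := ans_outer
    (changes.foldl pvApplyChange
      ((calculate_diff_dim2 grid).map (fun row => row ++ [0]) ++ [List.replicate ((grid.getD 0 []).length+1) 0]))
    grid.length (grid.getD 0 []).length grid.length (le_refl _)
  constructor
  · exact hArect
  · intro a b ha hb
    have h0 : pvGet2 (calculate_changed_nums_dim2 grid changes) a b =
        if a < grid.length then pvS (changes.foldl pvApplyChange
          ((calculate_diff_dim2 grid).map (fun row => row ++ [0]) ++ [List.replicate ((grid.getD 0 []).length+1) 0])) a b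
        else 0 := hAget a b ha hb
    rw [h0, if_pos ha]
    have hsum : pvS (changes.foldl pvApplyChange
          ((calculate_diff_dim2 grid).map (fun row => row ++ [0]) ++ [List.replicate ((grid.getD 0 []).length+1) 0])) a b =
        (∑ a' ∈ Finset.range (a+1), ∑ b' ∈ Finset.range (b+1), pvD0 grid a' b')
        + (∑ a' ∈ Finset.range (a+1), ∑ b' ∈ Finset.range (b+1),
            pvDeltaC grid.length (grid.getD 0 []).length changes a' b') := by
      unfold pvS pvRowSum
      rw [← Finset.sum_add_distrib]
      refine Finset.sum_congr rfl ?_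
      intro a' ha'
      rw [← Finset.sum_add_distrib]
      refine Finset.sum_congr rfl ?_
      intro b' hb'
      have ha2 : a' < grid.length := by
        have := Finset.mem_range.mp ha'; omega
      have hb2 : b' < (grid.getD 0 []).length := by
        have := Finset.mem_range.mp hb'; omega
      rw [hCget a' b', hPget a' b' ha2 hb2]
    rw [hsum, pvS_D0 grid a b]

-- ---- B's characterisation ----
lemma calcB_spec (grid changes : List (List Int))
    (hcs : ∀ c ∈ changes, c.length = 5 ∧
      PySem.Raise.InRange (grid.length + 1) (c.getD 0 0) ∧
      PySem.Raise.InRange (grid.length + 1) (c.getD 2 0 + 1) ∧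
      PySem.Raise.InRange ((grid.getD 0 []).length + 1) (c.getD 1 0) ∧
      PySem.Raise.InRange ((grid.getD 0 []).length + 1) (c.getD 3 0 + 1)) :
    (calculate_changed_nums_dim2_alt grid changes).length = grid.length ∧
    ∀ a, a < grid.length →
      ((calculate_changed_nums_dim2_alt grid changes).getD a []).length = (grid.getD 0 []).length ∧
      ∀ b, b < (grid.getD 0 []).length →
        ((calculate_changed_nums_dim2_alt grid changes).getD a []).getD b 0 =
          pvGet2 grid a b + (∑ a' ∈ Finset.range (a+1), ∑ b' ∈ Finset.range (b+1),
            pvDeltaC grid.length (grid.getD 0 []).length changes a' b') := by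
  obtain ⟨hDrect, hDget⟩ := foldl_changes_spec changes
    (List.replicate (grid.length+1) (List.replicate ((grid.getD 0 []).length+1) 0))
    (pvRect_replicate _ _) hcs
  obtain ⟨hWrect, hWget⟩ := addB_outer
    (changes.foldl pvApplyChange (List.replicate (grid.length+1) (List.replicate ((grid.getD 0 []).length+1) 0)))
    grid.length (grid.getD 0 []).length grid.length (le_refl _)
  have hBdef : calculate_changed_nums_dim2_alt grid changes =
      (List.range grid.length).map (fun i => (List.range (grid.getD 0 []).length).map (fun j =>
        pvGet2 grid i j + pvGet2 ((List.range grid.length).foldl (fun add i =>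
          ((List.range (grid.getD 0 []).length).foldl (fun (p : List (List Int) × Int) j =>
            (pvSet2 p.1 i j ((p.2 + pvGet2 (changes.foldl pvApplyChange
                (List.replicate (grid.length+1) (List.replicate ((grid.getD 0 []).length+1) 0))) i j)
              + (if 0 < i then pvGet2 p.1 (i-1) j else 0)),
              p.2 + pvGet2 (changes.foldl pvApplyChange
                (List.replicate (grid.length+1) (List.replicate ((grid.getD 0 []).length+1) 0))) i j))
            (add, 0)).1)
          (List.replicate grid.length (List.replicate (grid.getD 0 []).length 0))) i j)) := rfl
  have hcell : ∀ a b, a < grid.length → b < (grid.getD 0 []).length →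
      pvGet2 ((List.range grid.length).foldl (fun add i =>
          ((List.range (grid.getD 0 []).length).foldl (fun (p : List (List Int) × Int) j =>
            (pvSet2 p.1 i j ((p.2 + pvGet2 (changes.foldl pvApplyChange
                (List.replicate (grid.length+1) (List.replicate ((grid.getD 0 []).length+1) 0))) i j)
              + (if 0 < i then pvGet2 p.1 (i-1) j else 0)),
              p.2 + pvGet2 (changes.foldl pvApplyChange
                (List.replicate (grid.length+1) (List.replicate ((grid.getD 0 []).length+1) 0))) i j))
            (add, 0)).1)
          (List.replicate grid.length (List.replicate (grid.getD 0 []).length 0))) a b =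
        ∑ a' ∈ Finset.range (a+1), ∑ b' ∈ Finset.range (b+1),
          pvDeltaC grid.length (grid.getD 0 []).length changes a' b' := by
    intro a b ha hb
    have h0 := hWget a b ha hb
    rw [if_pos ha] at h0
    rw [h0]
    unfold pvS pvRowSum
    refine Finset.sum_congr rfl ?_
    intro a' _
    refine Finset.sum_congr rfl ?_
    intro b' _
    rw [hDget a' b', pvGet2_replicate]
    ring
  rw [hBdef]
  constructor
  · rw [List.length_map, List.length_range]
  · intro a ha
    have ha' : a < ((List.range grid.length).map (fun i => (List.range (grid.getD 0 []).length).map (fun j =>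
        pvGet2 grid i j + pvGet2 ((List.range grid.length).foldl (fun add i =>
          ((List.range (grid.getD 0 []).length).foldl (fun (p : List (List Int) × Int) j =>
            (pvSet2 p.1 i j ((p.2 + pvGet2 (changes.foldl pvApplyChange
                (List.replicate (grid.length+1) (List.replicate ((grid.getD 0 []).length+1) 0))) i j)
              + (if 0 < i then pvGet2 p.1 (i-1) j else 0)),
              p.2 + pvGet2 (changes.foldl pvApplyChange
                (List.replicate (grid.length+1) (List.replicate ((grid.getD 0 []).length+1) 0))) i j))
            (add, 0)).1)
          (List.replicate grid.length (List.replicate (grid.getD 0 []).length 0))) i j))).length := by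
      rw [List.length_map, List.length_range]; exact ha
    rw [getD_of_lt _ a ha', List.getElem_map, List.getElem_range]
    constructor
    · rw [List.length_map, List.length_range]
    · intro b hb
      have hb' : b < ((List.range (grid.getD 0 []).length).map (fun j =>
          pvGet2 grid a j + pvGet2 ((List.range grid.length).foldl (fun add i =>
            ((List.range (grid.getD 0 []).length).foldl (fun (p : List (List Int) × Int) j =>
              (pvSet2 p.1 i j ((p.2 + pvGet2 (changes.foldl pvApplyChange
                  (List.replicate (grid.length+1) (List.replicate ((grid.getD 0 []).length+1) 0))) i j)
                + (if 0 < i then pvGet2 p.1 (i-1) j else 0)),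
                p.2 + pvGet2 (changes.foldl pvApplyChange
                  (List.replicate (grid.length+1) (List.replicate ((grid.getD 0 []).length+1) 0))) i j))
              (add, 0)).1)
            (List.replicate grid.length (List.replicate (grid.getD 0 []).length 0))) a j)).length := by
        rw [List.length_map, List.length_range]; exact hb
      rw [getD_of_lt_int _ b hb', List.getElem_map, List.getElem_range, hcell a b ha hb]

-- ===== VERDICT (by name: the statement is the Claim_ definition above) =====
theorem calculate_changed_nums_dim2_spec : Claim_equal_calculate_changed_nums_dim2 := by
  intro grid changes _ hpre
  unfold Spec_calculate_changed_nums_dim2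
  obtain ⟨-, -, hcs⟩ := hpre
  obtain ⟨⟨hAlen, hArow⟩, hAget⟩ := calcA_spec grid changes hcs
  obtain ⟨hBlen, hBrest⟩ := calcB_spec grid changes hcs
  apply List.ext_getElem (by rw [hAlen, hBlen])
  intro a h1 h2
  have ha : a < grid.length := by rwa [hAlen] at h1
  obtain ⟨hBrowlen, hBentry⟩ := hBrest a ha
  have hBrow : (calculate_changed_nums_dim2_alt grid changes)[a]'h2 =
      (calculate_changed_nums_dim2_alt grid changes).getD a [] :=
    (getD_of_lt _ a (by rw [hBlen]; exact ha)).symm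
  apply List.ext_getElem
  · rw [hArow a h1, hBrow, hBrowlen]
  · intro b hb1 hb2
    have hbn : b < (grid.getD 0 []).length := by rwa [hArow a h1] at hb1
    rw [getElem2_eq_pvGet2 _ a b (by rwa [hAlen]) hb1, hAget a b ha hbn]
    have h3 : ((calculate_changed_nums_dim2_alt grid changes)[a]'h2)[b]'hb2 =
        ((calculate_changed_nums_dim2_alt grid changes).getD a []).getD b 0 := by
      rw [getD_of_lt _ a (by rw [hBlen]; exact ha), getD_of_lt_int _ b (by exact hb2)]
    rw [hBentry b hbn] at h3
    rw [h3]
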